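-- pv_equiv track=rewrite | github.com/jpmml/sklearn2pmml | sklearn2pmml/__init__.py | _expand_complex_key
-- ===== SOURCE A (Python) =====
-- def _expand_complex_key(key):
-- 	begin = key.find("(")
-- 	end = key.find(")", begin + 1)
-- 	if begin < 0 or end < 0:
-- 		return [key]
--
-- 	prefix = key[:begin]
-- 	body = key[begin + 1:end]
-- 	suffix = key[end + 1:]
--
-- 	result = []
-- 	parts = body.split("|")
-- 	for part in parts:
-- 		result += _expand_complex_key(prefix + part + suffix)
-- 	return result
-- ===== SOURCE B (Python) =====
-- def _expand_complex_key(key):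
-- 	result = [key]
-- 	i = 0
-- 	while i < len(result):
-- 		s = result[i]
-- 		begin = s.find("(")
-- 		end = s.find(")", begin + 1)
-- 		if begin < 0 or end < 0:
-- 			i += 1
-- 			continue
-- 		prefix = s[:begin]
-- 		body = s[begin + 1:end]
-- 		suffix = s[end + 1:]
-- 		result[i:i + 1] = [prefix + part + suffix for part in body.split("|")]
-- 	return result
-- ===== Notes on version B (the rewrite author's own statement) =====
-- stated objective: alternative
-- what changed: A's recursive expansion is replaced by an iterative worklist with a cursor: the list starts as [key], an expansion splices its pieces in at the cursor without advancing it, and paren-free strings move past the cursor, yielding the same depth-first leaf order without recursion.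
import Mathlib
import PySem

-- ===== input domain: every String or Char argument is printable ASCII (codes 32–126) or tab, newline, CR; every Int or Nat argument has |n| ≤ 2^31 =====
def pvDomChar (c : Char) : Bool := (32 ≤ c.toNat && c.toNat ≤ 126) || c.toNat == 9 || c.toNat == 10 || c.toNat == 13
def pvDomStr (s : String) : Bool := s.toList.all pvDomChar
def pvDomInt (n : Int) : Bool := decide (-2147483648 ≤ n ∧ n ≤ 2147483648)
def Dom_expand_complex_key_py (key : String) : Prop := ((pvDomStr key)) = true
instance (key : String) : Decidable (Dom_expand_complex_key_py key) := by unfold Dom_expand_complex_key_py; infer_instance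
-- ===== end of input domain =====

-- B replaces A's recursion by an iterative worklist over a cursor (same per-string scan, same depth-first order); objective: alternative.
-- In both ports the Nat fuel is only a totality guard (each A-recursion shortens the string by ≥ 2; each B-step strictly
-- shrinks a factorial-sum measure); the proofs below show the guarded branch is never reached from the entry points.

-- ===== PORT A =====
-- A's recursion, on code-point lists (PySem string primitives are defined there).
def pvExpandAF : Nat → List Char → List (List Char)
  | 0, s => [s]
  | Nat.succ n, s =>
    let b := PySem.Chars.find s ['(']
    let e := PySem.Chars.findFrom s [')'] (b + 1) none
    if b < 0 ∨ e < 0 then [s]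
    else
      let pre := PySem.List.slice s none (some b)
      let body := PySem.List.slice s (some (b + 1)) (some e)
      let suf := PySem.List.slice s (some (e + 1)) none
      let parts := PySem.Chars.splitOn body ['|']
      parts.foldl (fun r p => r ++ pvExpandAF n (pre ++ p ++ suf)) []

def expand_complex_key_py (key : String) : List String :=
  (pvExpandAF (key.toList.length + 1) key.toList).map String.ofList

-- ===== PORT B =====
-- B's worklist: done = result[:i] (the scanned prefix), pending = result[i:]; an expansion
-- splices the pieces in at the cursor without advancing it, a paren-free string moves to done.
def pvLoopBF : Nat → List (List Char) → List (List Char) → List (List Char)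
  | 0, done, pending => done ++ pending
  | Nat.succ n, done, pending =>
    match pending with
    | [] => done
    | s :: rest =>
      let i := PySem.Chars.find s ['(']
      let j := PySem.Chars.findFrom s [')'] (i + 1) none
      if i < 0 ∨ j < 0 then
        pvLoopBF n (done ++ [s]) rest
      else
        pvLoopBF n done
          (((PySem.Chars.splitOn (PySem.List.slice s (some (i + 1)) (some j)) ['|']).map
              (fun p => PySem.List.slice s none (some i) ++ p ++
                PySem.List.slice s (some (j + 1)) none)) ++ rest)

def expand_complex_key_py_alt (key : String) : List String :=
  (pvLoopBF (Nat.factorial (key.toList.length + 1)) [] [key.toList]).map String.ofList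

-- ===== PRECONDITION & SPEC =====
def Spec_expand_complex_key_py (key : String) (out : List String) : Prop := out = expand_complex_key_py_alt key
instance (key : String) (out : List String) : Decidable (Spec_expand_complex_key_py key out) := by unfold Spec_expand_complex_key_py; infer_instance

-- ===== CLAIM (what is proved, stated in full; the proofs are below) =====
def Claim_equal_expand_complex_key_py : Prop := ∀ (key : String), Dom_expand_complex_key_py key → Spec_expand_complex_key_py key (expand_complex_key_py key)

-- ===== LEMMAS AND PROOFS =====
theorem pvSplitGoMemLen (sep : List Char) (fuel : Nat) :
    ∀ (l cur : List Char) (acc : List (List Char)) (p : List Char),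
      p ∈ PySem.Chars.splitOn.go sep fuel l cur acc → p ∈ acc ∨ p.length ≤ cur.length + l.length := by
  induction fuel with
  | zero =>
    intro l cur acc p hp
    simp [PySem.Chars.splitOn.go] at hp
    rcases hp with h | h
    · left; exact h
    · right; subst h; simp
  | succ n ih =>
    intro l cur acc p hp
    cases l with
    | nil =>
      simp [PySem.Chars.splitOn.go] at hp
      rcases hp with h | h
      · left; exact h
      · right; subst h; simp
    | cons c rest =>
      rw [PySem.Chars.splitOn.go] at hp
      by_cases hpre : sep.isPrefixOf (c :: rest) = true
      · simp only [hpre, if_true] at hp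
        rcases ih _ _ _ _ hp with h | h
        · rcases List.mem_cons.mp h with h' | h'
          · right; subst h'; simp
          · left; exact h'
        · right
          simp only [List.length_nil, Nat.zero_add, List.length_drop] at h ⊢
          omega
      · simp only [hpre] at hp
        rcases ih _ _ _ _ hp with h | h
        · left; exact h
        · right; simp at h ⊢; omega

theorem pvSplitMemLen (s sep p : List Char) (hp : p ∈ PySem.Chars.splitOn s sep) :
    p.length ≤ s.length := by
  have := pvSplitGoMemLen sep (s.length + 1) s [] [] p hp
  simpa using this

theorem pvSplitGoCount (sep : List Char) (hsep : 1 ≤ sep.length) (fuel : Nat) :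
    ∀ (l cur : List Char) (acc : List (List Char)),
      (PySem.Chars.splitOn.go sep fuel l cur acc).length ≤ acc.length + 1 + l.length := by
  induction fuel with
  | zero => intro l cur acc; simp [PySem.Chars.splitOn.go]
  | succ n ih =>
    intro l cur acc
    cases l with
    | nil => simp [PySem.Chars.splitOn.go]
    | cons c rest =>
      rw [PySem.Chars.splitOn.go]
      by_cases hpre : sep.isPrefixOf (c :: rest) = true
      · simp only [hpre, if_true]
        have := ih (List.drop sep.length (c :: rest)) [] (cur.reverse :: acc)
        simp only [List.length_cons, List.length_drop] at this ⊢
        omega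
      · simp only [hpre]
        have := ih rest (c :: cur) acc
        simp at this ⊢
        omega

theorem pvSplitCount (s sep : List Char) (hsep : 1 ≤ sep.length) :
    (PySem.Chars.splitOn s sep).length ≤ s.length + 1 := by
  have := pvSplitGoCount sep hsep (s.length + 1) s [] []
  simpa [PySem.Chars.splitOn, Nat.add_comm] using this

-- Positions of the two parens when both are found.
theorem pvParenBounds (s : List Char)
    (hb : ¬ PySem.Chars.find s ['('] < 0)
    (he : ¬ PySem.Chars.findFrom s [')'] (PySem.Chars.find s ['('] + 1) none < 0) :
    0 ≤ PySem.Chars.find s ['('] ∧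
    (PySem.Chars.find s ['(']).toNat + 1 ≤ (PySem.Chars.findFrom s [')'] (PySem.Chars.find s ['('] + 1) none).toNat ∧
    (PySem.Chars.findFrom s [')'] (PySem.Chars.find s ['('] + 1) none).toNat < s.length := by
  set b := PySem.Chars.find s ['('] with hbdef
  have hb0 : 0 ≤ b := by omega
  have hbs := (PySem.Chars.find_spec (sub := ['(']) hb0).1
  have hblt : b.toNat < s.length := by
    have := hbs.length_le
    simp [List.length_drop] at this
    omega
  have hcast : b + 1 = ((b.toNat + 1 : Nat) : Int) := by omega
  rw [hcast] at he ⊢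
  have hne : PySem.Chars.findFrom s [')'] ((b.toNat + 1 : Nat) : Int) none ≠ -1 := by omega
  have hspec := PySem.Chars.findFrom_natCast_spec s [')'] (b.toNat + 1) hblt hne
  have hke : ((b.toNat + 1 : Nat) : Int) ≤ PySem.Chars.findFrom s [')'] ((b.toNat + 1 : Nat) : Int) none := hspec.1
  have helt : (PySem.Chars.findFrom s [')'] ((b.toNat + 1 : Nat) : Int) none).toNat < s.length := by
    have hlen := hspec.2.1.length_le
    simp only [List.length_drop, List.length_cons, List.length_nil] at hlen
    omega
  refine ⟨hb0, by omega, helt⟩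

-- If both parens are found, every expanded candidate is at least 2 shorter than s.
theorem pvExpandLen (s p : List Char)
    (hb : ¬ PySem.Chars.find s ['('] < 0)
    (he : ¬ PySem.Chars.findFrom s [')'] (PySem.Chars.find s ['('] + 1) none < 0)
    (hp : p ∈ PySem.Chars.splitOn
        (PySem.List.slice s (some (PySem.Chars.find s ['('] + 1))
          (some (PySem.Chars.findFrom s [')'] (PySem.Chars.find s ['('] + 1) none))) ['|']) :
    (PySem.List.slice s none (some (PySem.Chars.find s ['('])) ++ p ++
        PySem.List.slice s (some (PySem.Chars.findFrom s [')'] (PySem.Chars.find s ['('] + 1) none + 1)) none).length + 2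
      ≤ s.length := by
  obtain ⟨hb0, hbe, helt⟩ := pvParenBounds s hb he
  set b := PySem.Chars.find s ['('] with hbdef
  set e := PySem.Chars.findFrom s [')'] (b + 1) none with hedef
  have he0 : 0 ≤ e := by omega
  have hplen : p.length ≤ e.toNat - (b.toNat + 1) := by
    have := pvSplitMemLen _ _ _ hp
    rw [PySem.List.slice_toNat s (by omega) he0] at this
    simp only [List.length_take, List.length_drop] at this
    have h1 : (b + 1).toNat = b.toNat + 1 := by omega
    omega
  rw [PySem.List.slice_to s hb0, PySem.List.slice_from s (by omega : (0:Int) ≤ e + 1)]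
  simp only [List.length_append, List.length_take, List.length_drop]
  have h2 : (e + 1).toNat = e.toNat + 1 := by omega
  omega

theorem pvDecA (s p : List Char)
    (h : ¬ (PySem.Chars.find s ['('] < 0 ∨ PySem.Chars.findFrom s [')'] (PySem.Chars.find s ['('] + 1) none < 0))
    (hp : p ∈ PySem.Chars.splitOn
        (PySem.List.slice s (some (PySem.Chars.find s ['('] + 1))
          (some (PySem.Chars.findFrom s [')'] (PySem.Chars.find s ['('] + 1) none))) ['|']) :
    (PySem.List.slice s none (some (PySem.Chars.find s ['('])) ++ p ++
        PySem.List.slice s (some (PySem.Chars.findFrom s [')'] (PySem.Chars.find s ['('] + 1) none + 1)) none).length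
      < s.length := by
  have := pvExpandLen s p (fun hc => h (Or.inl hc)) (fun hc => h (Or.inr hc)) hp
  omega

-- Reference function: A's recursion once more, but by well-founded recursion (proof-side only).
def pvExpandR (s : List Char) : List (List Char) :=
  let b := PySem.Chars.find s ['(']
  let e := PySem.Chars.findFrom s [')'] (b + 1) none
  if h : b < 0 ∨ e < 0 then [s]
  else
    let pre := PySem.List.slice s none (some b)
    let body := PySem.List.slice s (some (b + 1)) (some e)
    let suf := PySem.List.slice s (some (e + 1)) none
    let parts := PySem.Chars.splitOn body ['|']
    parts.attach.foldl (fun r t => r ++ pvExpandR (pre ++ t.1 ++ suf)) []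
termination_by s.length
decreasing_by
  exact pvDecA s t.1 h t.2

theorem pvFoldlAttachFlat {α β : Type} (l : List α) (f : α → List β) :
    l.attach.foldl (fun r t => r ++ f t.1) [] = l.flatMap f := by
  have h1 := List.foldl_attach (l := l) (f := fun (r : List β) a => r ++ f a) (b := ([] : List β))
  have h2 := PySem.List.foldl_append_eq_flatMap f l []
  simp only [List.nil_append] at h2
  exact h1.trans h2

theorem pvExpandR_expand (s : List Char)
    (h : ¬ (PySem.Chars.find s ['('] < 0 ∨ PySem.Chars.findFrom s [')'] (PySem.Chars.find s ['('] + 1) none < 0)) :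
    pvExpandR s = ((PySem.Chars.splitOn
        (PySem.List.slice s (some (PySem.Chars.find s ['('] + 1))
          (some (PySem.Chars.findFrom s [')'] (PySem.Chars.find s ['('] + 1) none))) ['|']).map
        (fun p => PySem.List.slice s none (some (PySem.Chars.find s ['('])) ++ p ++
          PySem.List.slice s (some (PySem.Chars.findFrom s [')'] (PySem.Chars.find s ['('] + 1) none + 1)) none)).flatMap
      pvExpandR := by
  rw [pvExpandR]
  rw [dif_neg h]
  dsimp only
  refine (pvFoldlAttachFlat
      (PySem.Chars.splitOn
        (PySem.List.slice s (some (PySem.Chars.find s ['('] + 1))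
          (some (PySem.Chars.findFrom s [')'] (PySem.Chars.find s ['('] + 1) none))) ['|'])
      (fun p => pvExpandR
        (PySem.List.slice s none (some (PySem.Chars.find s ['('])) ++ p ++
          PySem.List.slice s (some (PySem.Chars.findFrom s [')'] (PySem.Chars.find s ['('] + 1) none + 1)) none))).trans ?_
  rw [List.flatMap_map]

-- The fuelled port A computes the reference expansion whenever fuel exceeds the string length.
theorem pvAF_eq (fuel : Nat) :
    ∀ s : List Char, s.length < fuel → pvExpandAF fuel s = pvExpandR s := by
  induction fuel with
  | zero => intro s hs; omega
  | succ n ih =>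
    intro s hs
    rw [pvExpandAF]
    by_cases h : PySem.Chars.find s ['('] < 0 ∨ PySem.Chars.findFrom s [')'] (PySem.Chars.find s ['('] + 1) none < 0
    · rw [if_pos h, pvExpandR, dif_pos h]
    · rw [if_neg h]
      rw [pvExpandR_expand s h]
      rw [PySem.List.foldl_append_eq_flatMap]
      rw [List.flatMap_map]
      rw [List.nil_append]
      apply List.flatMap_congr
      intro p hp
      exact ih _ (by have := pvExpandLen s p (fun hc => h (Or.inl hc)) (fun hc => h (Or.inr hc)) hp; omega)

def pvWeight (s : List Char) : Nat := Nat.factorial (s.length + 1)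

theorem pvLoopMeasure (s : List Char)
    (hb : ¬ PySem.Chars.find s ['('] < 0)
    (he : ¬ PySem.Chars.findFrom s [')'] (PySem.Chars.find s ['('] + 1) none < 0) :
    (((PySem.Chars.splitOn
          (PySem.List.slice s (some (PySem.Chars.find s ['('] + 1))
            (some (PySem.Chars.findFrom s [')'] (PySem.Chars.find s ['('] + 1) none))) ['|']).map
          (fun p => PySem.List.slice s none (some (PySem.Chars.find s ['('])) ++ p ++
            PySem.List.slice s (some (PySem.Chars.findFrom s [')'] (PySem.Chars.find s ['('] + 1) none + 1)) none)).map
        pvWeight).sum < pvWeight s := by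
  obtain ⟨hb0, hbe, helt⟩ := pvParenBounds s hb he
  set b := PySem.Chars.find s ['('] with hbdef
  set e := PySem.Chars.findFrom s [')'] (b + 1) none with hedef
  set body := PySem.List.slice s (some (b + 1)) (some e) with hbodydef
  set parts := PySem.Chars.splitOn body ['|'] with hpartsdef
  set n := s.length with hndef
  -- each piece weighs at most (n-1)!
  have hboundeach : ∀ x ∈ ((parts.map
      (fun p => PySem.List.slice s none (some b) ++ p ++ PySem.List.slice s (some (e + 1)) none)).map
      pvWeight), x ≤ Nat.factorial (n - 1) := by
    intro x hx
    rcases List.mem_map.mp hx with ⟨q, hq, hxq⟩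
    rcases List.mem_map.mp hq with ⟨p, hpmem, hqp⟩
    subst hxq; subst hqp
    have hlen := pvExpandLen s p hb he (by rw [← hbdef, ← hedef, ← hbodydef, ← hpartsdef] at *; exact hpmem)
    rw [← hbdef, ← hedef] at hlen
    unfold pvWeight
    exact Nat.factorial_le (by omega)
  -- at most n - 1 pieces
  have hbodylen : body.length ≤ n - 2 := by
    rw [hbodydef, PySem.List.slice_toNat s (by omega) (by omega)]
    simp only [List.length_take, List.length_drop]
    have h1 : (b + 1).toNat = b.toNat + 1 := by omega
    omega
  have hcount : parts.length ≤ n - 1 := by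
    have hc := pvSplitCount body ['|'] (by simp)
    rw [← hpartsdef] at hc
    omega
  have hsum := List.sum_le_card_nsmul _ _ hboundeach
  simp only [List.length_map, smul_eq_mul] at hsum
  have hn2 : 2 ≤ n := by omega
  have key2 : ∀ m : Nat, (m + 1) * Nat.factorial (m + 1) < Nat.factorial (m + 3) := by
    intro m
    have hfe : Nat.factorial (m + 3) = (m + 3) * ((m + 2) * Nat.factorial (m + 1)) := by
      rw [show m + 3 = m + 2 + 1 from rfl, Nat.factorial_succ, Nat.factorial_succ]
    rw [hfe]
    nlinarith [Nat.factorial_pos (m + 1)]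
  have key : (n - 1) * Nat.factorial (n - 1) < Nat.factorial (n + 1) := by
    have e1 : n - 1 = (n - 2) + 1 := by omega
    have e2 : n + 1 = (n - 2) + 3 := by omega
    rw [e1, e2]
    exact key2 (n - 2)
  have hmul : parts.length * Nat.factorial (n - 1) ≤ (n - 1) * Nat.factorial (n - 1) :=
    Nat.mul_le_mul_right _ hcount
  have hfin : ((parts.map
      (fun p => PySem.List.slice s none (some b) ++ p ++ PySem.List.slice s (some (e + 1)) none)).map
      pvWeight).sum < Nat.factorial (n + 1) := lt_of_le_of_lt (le_trans hsum hmul) key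
  unfold pvWeight
  rw [← hndef]
  exact hfin

-- The fuelled port B computes the reference expansion whenever fuel covers the measure.
theorem pvLoopF_eq (fuel : Nat) :
    ∀ (done pending : List (List Char)), (pending.map pvWeight).sum ≤ fuel →
      pvLoopBF fuel done pending = done ++ pending.flatMap pvExpandR := by
  induction fuel with
  | zero =>
    intro done pending hm
    cases pending with
    | nil => simp [pvLoopBF]
    | cons s rest =>
      exfalso
      have := Nat.factorial_pos (s.length + 1)
      simp only [List.map_cons, List.sum_cons, pvWeight] at hm
      omega
  | succ n ih =>
    intro done pending hm
    cases pending with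
    | nil => simp [pvLoopBF]
    | cons s rest =>
      rw [pvLoopBF]
      have hw : 1 ≤ pvWeight s := Nat.one_le_iff_ne_zero.mpr (Nat.factorial_ne_zero _)
      simp only [List.map_cons, List.sum_cons] at hm
      by_cases h : PySem.Chars.find s ['('] < 0 ∨ PySem.Chars.findFrom s [')'] (PySem.Chars.find s ['('] + 1) none < 0
      · rw [if_pos h]
        rw [ih (done ++ [s]) rest (by omega)]
        rw [List.flatMap_cons]
        rw [pvExpandR]
        rw [dif_pos h]
        simp
      · rw [if_neg h]
        have hms := pvLoopMeasure s (fun hc => h (Or.inl hc)) (fun hc => h (Or.inr hc))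
        rw [ih done _ (by
          simp only [List.map_append, List.sum_append, List.map_map]
          simp only [List.map_map] at hms
          omega)]
        rw [List.flatMap_append, List.flatMap_cons]
        rw [pvExpandR_expand s h]

-- ===== VERDICT (by name: the statement is the Claim_ definition above) =====
theorem expand_complex_key_py_spec : Claim_equal_expand_complex_key_py := by
  unfold Claim_equal_expand_complex_key_py
  intro key _
  unfold Spec_expand_complex_key_py expand_complex_key_py expand_complex_key_py_alt
  rw [pvLoopF_eq _ [] [key.toList] (by simp [pvWeight])]
  rw [pvAF_eq _ key.toList (by omega)]
  simp
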